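-- pv_equiv track=rewrite | github.com/hy2min/march_study | gyulmung/2503/Swea/250321/14159.py | Find
-- ===== SOURCE A (Python) =====
-- def Find(lst):
--     cnt = 0
--     for i in range(10):
--         if lst.count(i) >= 3:
--             return 1
--         if lst.count(i) >= 1:
--             cnt += 1
--         else:
--             cnt = 0
--         if cnt >= 3:
--             return 1
--     return 0
-- ===== SOURCE B (Python) =====
-- def Find(lst):
--     c = [0] * 10
--     for x in lst:
--         if 0 <= x <= 9:
--             c[x] += 1
--     if any(v >= 3 for v in c):
--         return 1
--     if any(a >= 1 and b >= 1 and d >= 1 for (a, b), d in zip(zip(c, c[1:]), c[2:])):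
--         return 1
--     return 0
-- ===== Notes on version B (the rewrite author's own statement) =====
-- stated objective: faster
-- what changed: B builds a length-10 frequency table in one pass over the list and then makes two separate scans over the table (any count >= 3; any window of three consecutive present digits via zip), replacing A's twenty repeated lst.count scans interleaved with a stateful run counter and early returns.
import Mathlib
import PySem

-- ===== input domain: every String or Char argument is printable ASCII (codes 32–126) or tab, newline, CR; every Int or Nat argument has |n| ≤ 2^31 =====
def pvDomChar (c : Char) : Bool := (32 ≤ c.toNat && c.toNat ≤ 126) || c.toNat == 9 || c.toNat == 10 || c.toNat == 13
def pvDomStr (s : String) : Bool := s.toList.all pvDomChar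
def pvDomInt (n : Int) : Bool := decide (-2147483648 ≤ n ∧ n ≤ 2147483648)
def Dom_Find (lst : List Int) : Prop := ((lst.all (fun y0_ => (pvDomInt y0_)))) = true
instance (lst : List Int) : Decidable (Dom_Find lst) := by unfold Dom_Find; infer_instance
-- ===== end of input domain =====

-- B replaces A's twenty repeated lst.count scans inside one stateful loop by a frequency
-- table built in a single pass plus two separate scans over the table (measured faster).

-- ===== PORT A =====
-- the 'for i in range(10)' loop with early returns; cntOf i = lst.count(i)
def FindGo (cntOf : Int → Nat) : List Int → Int → Int
  | [], _ => 0
  | i :: rest, cnt =>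
    if cntOf i ≥ 3 then 1
    else
      let cnt' : Int := if cntOf i ≥ 1 then cnt + 1 else 0
      if cnt' ≥ 3 then 1 else FindGo cntOf rest cnt'

def Find (lst : List Int) : Int :=
  FindGo (fun i => PySem.List.count lst i) (PySem.List.pyRange 0 10 1) 0

-- ===== PORT B =====
-- c = [0]*10; for x in lst: if 0 <= x <= 9: c[x] += 1
def FindTable (lst : List Int) : List Int :=
  lst.foldl (fun c x => if 0 ≤ x ∧ x ≤ 9 then c.set x.toNat (c.getD x.toNat 0 + 1) else c)
    (List.replicate 10 0)

def Find_alt (lst : List Int) : Int :=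
  let c := FindTable lst
  if c.any (fun v => decide (3 ≤ v)) then 1
  else if ((c.zip (c.drop 1)).zip (c.drop 2)).any
      (fun p => decide (1 ≤ p.1.1) && decide (1 ≤ p.1.2) && decide (1 ≤ p.2)) then 1
  else 0

-- ===== PRECONDITION & SPEC =====
def Spec_Find (lst : List Int) (out : Int) : Prop := out = Find_alt lst
instance (lst : List Int) (out : Int) : Decidable (Spec_Find lst out) := by unfold Spec_Find; infer_instance

-- ===== CLAIM (what is proved, stated in full; the proofs are below) =====
def Claim_equal_Find : Prop := ∀ (lst : List Int), Dom_Find lst → Spec_Find lst (Find lst)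

-- ===== LEMMAS AND PROOFS =====

lemma table_aux (l : List Int) : ∀ (c : List Int), c.length = 10 →
    (l.foldl (fun c x => if 0 ≤ x ∧ x ≤ 9 then c.set x.toNat (c.getD x.toNat 0 + 1) else c) c).length = 10 ∧
    ∀ i : Nat, i < 10 →
      (l.foldl (fun c x => if 0 ≤ x ∧ x ≤ 9 then c.set x.toNat (c.getD x.toNat 0 + 1) else c) c).getD i 0
        = c.getD i 0 + (PySem.List.count l (i : Int) : Int) := by
  induction l with
  | nil => intro c hc; simp [PySem.List.count_eq, hc]
  | cons x t ih =>
    intro c hc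
    simp only [List.foldl_cons]
    by_cases hx : 0 ≤ x ∧ x ≤ 9
    · rw [if_pos hx]
      have hlen : (c.set x.toNat (c.getD x.toNat 0 + 1)).length = 10 := by simp [hc]
      obtain ⟨H1, H2⟩ := ih _ hlen
      refine ⟨H1, ?_⟩
      intro i hi
      rw [H2 i hi]
      by_cases hxi : x = (i : Int)
      · have hti : x.toNat = i := by omega
        simp [List.getD_eq_getElem?_getD, hc, hi,
          PySem.List.count_eq, hxi]
        omega
      · have hti : x.toNat ≠ i := by omega
        simp [List.getD_eq_getElem?_getD, List.getElem?_set, hti,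
          PySem.List.count_eq, List.count_cons]
        all_goals omega
    · rw [if_neg hx]
      obtain ⟨H1, H2⟩ := ih c hc
      refine ⟨H1, ?_⟩
      intro i hi
      rw [H2 i hi]
      simp [PySem.List.count_eq, List.count_cons]
      all_goals omega

lemma findTable_eq (lst : List Int) :
    FindTable lst = (List.range 10).map (fun i : Nat => (PySem.List.count lst ((i : Int)) : Int)) := by
  obtain ⟨H1, H2⟩ := table_aux lst (List.replicate 10 0) (by simp)
  apply List.ext_getElem
  · unfold FindTable; rw [H1]; simp
  · intro i h1 h2
    unfold FindTable at h1 ⊢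
    have hi : i < 10 := by rw [H1] at h1; exact h1
    have key := H2 i hi
    rw [List.getD_eq_getElem?_getD, List.getD_eq_getElem?_getD,
      List.getElem?_eq_getElem h1] at key
    simp only [List.getElem?_replicate, if_pos hi, Option.getD_some] at key
    simp only [List.getElem_map, List.getElem_range]
    omega

-- A's loop over i = 0..9, abstracted to a scan over the list of counts.
def ScanA : List Int → Int → Int
  | [], _ => 0
  | v :: rest, cnt =>
    if v ≥ 3 then 1
    else
      let cnt' : Int := if v ≥ 1 then cnt + 1 else 0
      if cnt' ≥ 3 then 1 else ScanA rest cnt'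

def Big (l : List Int) : Prop := ∃ v ∈ l, 3 ≤ v

def Win : List Int → Prop
  | a :: b :: c :: rest => (1 ≤ a ∧ 1 ≤ b ∧ 1 ≤ c) ∨ Win (b :: c :: rest)
  | _ => False

def H1 : List Int → Prop
  | a :: _ => 1 ≤ a
  | [] => False

def H2 : List Int → Prop
  | a :: b :: _ => 1 ≤ a ∧ 1 ≤ b
  | _ => False

lemma h2_imp_h1 : ∀ t : List Int, H2 t → H1 t := by
  intro t h
  match t with
  | a :: b :: r => exact h.1
  | [] => exact h
  | [a] => exact h.elim

lemma big_cons (v : Int) (t : List Int) : Big (v :: t) ↔ 3 ≤ v ∨ Big t := by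
  simp [Big]

lemma win_cons_absent (v : Int) (t : List Int) (hv : ¬ 1 ≤ v) : Win (v :: t) ↔ Win t := by
  match t with
  | [] => simp [Win]
  | [b] => simp [Win]
  | b :: c :: r => simp [Win]; tauto

lemma win_cons_present (v : Int) (t : List Int) (hv : 1 ≤ v) : Win (v :: t) ↔ H2 t ∨ Win t := by
  match t with
  | [] => simp [Win, H2]
  | [b] => simp [Win, H2]
  | b :: c :: r => simp [Win, H2, hv]

lemma bridge (k : Int → Nat) : ∀ (is : List Int) (cnt : Int),
    FindGo k is cnt = ScanA (is.map (fun i => ((k i : Int)))) cnt := by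
  intro is
  induction is with
  | nil => intro cnt; rfl
  | cons i t ih =>
    intro cnt
    simp only [List.map_cons, FindGo, ScanA]
    by_cases c3 : k i ≥ 3
    · rw [if_pos c3, if_pos (by exact_mod_cast c3 : ((k i : Int) ≥ 3))]
    · rw [if_neg c3, if_neg (by exact_mod_cast c3 : ¬ ((k i : Int) ≥ 3))]
      have hc : (if ((k i : Int) ≥ 1) then cnt + 1 else (0 : Int))
          = (if (k i ≥ 1) then cnt + 1 else (0 : Int)) := by
        by_cases c1 : k i ≥ 1
        · rw [if_pos c1, if_pos (by exact_mod_cast c1 : ((k i : Int) ≥ 1))]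
        · rw [if_neg c1, if_neg (by exact_mod_cast c1 : ¬ ((k i : Int) ≥ 1))]
      simp only [hc, ih]

lemma scan01 : ∀ (l : List Int) (cnt : Int), ScanA l cnt = 0 ∨ ScanA l cnt = 1 := by
  intro l
  induction l with
  | nil => intro cnt; left; rfl
  | cons v t ih =>
    intro cnt
    simp only [ScanA]
    split_ifs <;> first | (right; rfl) | exact ih _

lemma scan_iff : ∀ (l : List Int) (cnt : Int), 0 ≤ cnt →
    (ScanA l cnt = 1 ↔ Big l ∨ Win l ∨ (2 ≤ cnt ∧ H1 l) ∨ (cnt = 1 ∧ H2 l)) := by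
  intro l
  induction l with
  | nil => intro cnt _; simp [ScanA, Big, Win, H1, H2]
  | cons v t ih =>
    intro cnt hcnt
    simp only [ScanA]
    by_cases h3 : v ≥ 3
    · rw [if_pos h3]
      simp only [big_cons]
      constructor
      · intro _; exact Or.inl (Or.inl h3)
      · intro _; trivial
    · rw [if_neg h3]
      by_cases h1 : v ≥ 1
      · rw [if_pos h1]
        by_cases hge : cnt + 1 ≥ 3
        · rw [if_pos hge]
          have hH1 : H1 (v :: t) := h1
          constructor
          · intro _
            exact Or.inr (Or.inr (Or.inl ⟨by omega, hH1⟩))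
          · intro _; rfl
        · rw [if_neg hge]
          rw [ih (cnt + 1) (by omega)]
          rw [big_cons, win_cons_present v t h1]
          have hc01 : cnt = 0 ∨ cnt = 1 := by omega
          have hH1c : H1 (v :: t) ↔ True := by simp [H1]; omega
          have hH2c : H2 (v :: t) ↔ H1 t := by
            match t with
            | [] => simp [H2, H1]
            | b :: r => simp [H2, H1, h1]
          rw [hH1c, hH2c]
          have h21 := h2_imp_h1 t
          rcases hc01 with h | h <;> subst h <;> norm_num <;> tauto
      · rw [if_neg h1]
        rw [if_neg (by omega : ¬ ((0 : Int) ≥ 3))]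
        rw [ih 0 le_rfl]
        rw [big_cons, win_cons_absent v t h1]
        have hH1c : ¬ H1 (v :: t) := by simp [H1]; omega
        have hH2c : ¬ H2 (v :: t) := by
          match t with
          | [] => simp [H2]
          | b :: r => intro h; simp only [H2] at h; exact h1 h.1
        constructor
        · rintro (hb | hw | ⟨_, _⟩ | ⟨_, _⟩)
          · exact Or.inl (Or.inr hb)
          · exact Or.inr (Or.inl hw)
          · tauto
          · tauto
        · rintro ((hb | hb) | hw | ⟨_, hh⟩ | ⟨_, hh⟩)
          · exact absurd hb h3
          · exact Or.inl hb
          · exact Or.inr (Or.inl hw)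
          · exact absurd hh hH1c
          · exact absurd hh hH2c

lemma big_bool (c : List Int) : (c.any (fun v => decide (3 ≤ v)) = true) ↔ Big c := by
  simp [Big, List.any_eq_true]

lemma win_bool : ∀ c : List Int,
    (((c.zip (c.drop 1)).zip (c.drop 2)).any
      (fun p => decide (1 ≤ p.1.1) && decide (1 ≤ p.1.2) && decide (1 ≤ p.2)) = true) ↔ Win c := by
  intro c
  induction c with
  | nil => simp [Win]
  | cons a t ih =>
    match t, ih with
    | [], _ => simp [Win]
    | [b], _ => simp [Win]
    | b :: d :: r, ih =>
      simp only [List.drop, List.zip, List.zipWith, List.any_cons, Bool.or_eq_true,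
        Bool.and_eq_true, decide_eq_true_eq] at ih ⊢
      rw [ih]
      show (((1 ≤ a) ∧ (1 ≤ b)) ∧ (1 ≤ d)) ∨ Win (b :: d :: r) ↔ Win (a :: b :: d :: r)
      simp [Win]
      tauto

theorem Find_eq_alt (lst : List Int) : Find lst = Find_alt lst := by
  have hr : PySem.List.pyRange 0 10 1 = [0,1,2,3,4,5,6,7,8,9] := by decide
  unfold Find Find_alt
  rw [hr, bridge]
  have hmapeq : ([0,1,2,3,4,5,6,7,8,9] : List Int).map
      (fun i => ((PySem.List.count lst i : Nat) : Int)) = FindTable lst := by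
    rw [findTable_eq]
    norm_num [List.range_succ]
  rw [hmapeq]
  by_cases hb : Big (FindTable lst)
  · rw [if_pos ((big_bool _).mpr hb)]
    exact (scan_iff _ 0 le_rfl).mpr (Or.inl hb)
  · rw [if_neg (fun h => hb ((big_bool _).mp h))]
    by_cases hw : Win (FindTable lst)
    · rw [if_pos ((win_bool _).mpr hw)]
      exact (scan_iff _ 0 le_rfl).mpr (Or.inr (Or.inl hw))
    · rw [if_neg (fun h => hw ((win_bool _).mp h))]
      rcases scan01 (FindTable lst) 0 with h0 | h0
      · exact h0
      · exact absurd ((scan_iff _ 0 le_rfl).mp h0) (by simp [hb, hw, H1, H2])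

-- ===== VERDICT (by name: the statement is the Claim_ definition above) =====
theorem Find_spec : Claim_equal_Find := by
  intro lst _
  unfold Spec_Find
  exact Find_eq_alt lst
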